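-- pv_equiv track=rewrite | github.com/SafonovVladimir/mornings | 02 february/02/3.py | get_section_id
-- ===== SOURCE A (Python) =====
-- def get_section_id(scroll: int, sizes: list) -> int:
--
--     if scroll < 0:
--         return -1
--
--     elif scroll >= sum(sizes):
--         return -1
--
--     else:
--         result = []
--         for index, value in enumerate(sizes):
--             result.append(value)
--             if scroll < sum(result):
--                 return index
-- ===== SOURCE B (Python) =====
-- def get_section_id(scroll: int, sizes: list) -> int:
--     if scroll < 0 or scroll >= sum(sizes):
--         return -1
--     # Walk sections subtracting each size from the remaining offset; the
--     # invariant rem < sum(sizes[i:]) keeps the index in range.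
--     rem = scroll
--     i = 0
--     while rem >= sizes[i]:
--         rem -= sizes[i]
--         i += 1
--     return i
-- ===== Notes on version B (the rewrite author's own statement) =====
-- stated objective: alternative
-- what changed: B replaces A's append-to-a-list-and-recompute-sum(result) scan by a while loop that subtracts each size from the remaining scroll offset and stops when the residual fits in the current section; no accumulator list, no prefix sums, no enumerate.
import Mathlib
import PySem

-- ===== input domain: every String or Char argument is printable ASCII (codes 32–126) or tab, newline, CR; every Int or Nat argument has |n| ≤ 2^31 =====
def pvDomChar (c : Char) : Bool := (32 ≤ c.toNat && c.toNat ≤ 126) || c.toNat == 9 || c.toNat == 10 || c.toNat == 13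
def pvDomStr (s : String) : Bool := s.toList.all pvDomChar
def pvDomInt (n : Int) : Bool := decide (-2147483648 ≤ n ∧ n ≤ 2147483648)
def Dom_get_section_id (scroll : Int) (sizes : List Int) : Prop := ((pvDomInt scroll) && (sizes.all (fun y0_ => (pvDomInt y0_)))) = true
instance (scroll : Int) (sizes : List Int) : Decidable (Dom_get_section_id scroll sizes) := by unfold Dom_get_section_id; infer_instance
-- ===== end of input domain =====

-- B replaces A's append-and-resum scan by a while loop that subtracts each size from
-- the remaining scroll offset and stops when the residual fits (objective: alternative).

-- ===== PORT A =====
-- A's loop: appends value to result, recomputes sum(result) each iteration.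
def pvALoop (scroll : Int) : List Int → List Int → Int → Int
  | [], _, _ => -1  -- unreachable under the else branch (scroll < sum sizes); Python would fall through returning None
  | v :: rest, result, index =>
    let result' := result ++ [v]
    if scroll < result'.sum then index else pvALoop scroll rest result' (index + 1)

def get_section_id (scroll : Int) (sizes : List Int) : Int :=
  if scroll < 0 then -1
  else if scroll ≥ sizes.sum then -1
  else pvALoop scroll sizes [] 0

-- ===== PORT B =====
-- B's while loop: recursion over the suffix of sizes starting at index i, carrying (rem, i).
def pvBWhile (rem : Int) : List Int → Int → Int
  | [], i => i  -- unreachable: rem < sum of the suffix is an invariant (Python would raise IndexError)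
  | v :: rest, i => if rem < v then i else pvBWhile (rem - v) rest (i + 1)

def get_section_id_alt (scroll : Int) (sizes : List Int) : Int :=
  if scroll < 0 ∨ scroll ≥ sizes.sum then -1
  else pvBWhile scroll sizes 0

-- ===== PRECONDITION & SPEC =====
def Spec_get_section_id (scroll : Int) (sizes : List Int) (out : Int) : Prop := out = get_section_id_alt scroll sizes
instance (scroll : Int) (sizes : List Int) (out : Int) : Decidable (Spec_get_section_id scroll sizes out) := by unfold Spec_get_section_id; infer_instance

-- ===== CLAIM (what is proved, stated in full; the proofs are below) =====
def Claim_equal_get_section_id : Prop := ∀ (scroll : Int) (sizes : List Int), Dom_get_section_id scroll sizes → Spec_get_section_id scroll sizes (get_section_id scroll sizes)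

-- ===== LEMMAS AND PROOFS =====
theorem pvLoop_eq (scroll : Int) :
    ∀ (rest result : List Int) (index : Int),
      result.sum ≤ scroll → scroll < result.sum + rest.sum →
      pvALoop scroll rest result index = pvBWhile (scroll - result.sum) rest index := by
  intro rest
  induction rest with
  | nil =>
    intro result index h1 h2
    simp at h2
    omega
  | cons v rest ih =>
    intro result index h1 h2
    simp only [pvALoop, pvBWhile]
    have hs : (result ++ [v]).sum = result.sum + v := by simp
    rw [hs]
    by_cases hv : scroll < result.sum + v
    · rw [if_pos hv, if_pos (by omega : scroll - result.sum < v)]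
    · rw [if_neg hv, if_neg (by omega : ¬ scroll - result.sum < v)]
      rw [ih (result ++ [v]) (index + 1) (by omega) (by simpa [hs, add_assoc] using h2)]
      rw [hs]
      congr 1
      ring

-- ===== VERDICT (by name: the statement is the Claim_ definition above) =====
theorem get_section_id_spec : Claim_equal_get_section_id := by
  intro scroll sizes _
  unfold Spec_get_section_id get_section_id get_section_id_alt
  by_cases h0 : scroll < 0
  · simp [h0]
  · by_cases h1 : scroll ≥ sizes.sum
    · simp [h0, h1]
    · rw [if_neg h0, if_neg h1, if_neg (show ¬(scroll < 0 ∨ scroll ≥ sizes.sum) from by tauto)]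
      have := pvLoop_eq scroll sizes [] 0 (by simpa using not_lt.mp h0) (by simpa using not_le.mp h1)
      simpa using this
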